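-- pv_equiv track=rewrite | github.com/thetringuyen/Project-Euler | algorithm.py | bcdToDec
-- ===== SOURCE A (Python) =====
-- def bcdToDec(n):
--     if n <= 0:
--         return 0
--     m = ''
--     while n > 0:
--         m = str(n & 0xF) + m
--         n >>= 4
--     return int(m)
-- ===== SOURCE B (Python) =====
-- def bcdToDec(n):
--     if n <= 0:
--         return 0
--     s = format(n, 'x')
--     return int(''.join(str(int(c, 16)) for c in s))
-- ===== Notes on version B (the rewrite author's own statement) =====
-- stated objective: idiomatic
-- what changed: B formats n as a hex string once and maps each hex digit character to its decimal string most-significant-first, instead of A's bit-shift loop that extracts nibbles LSB-first and prepends to an accumulator string.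
import Mathlib
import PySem

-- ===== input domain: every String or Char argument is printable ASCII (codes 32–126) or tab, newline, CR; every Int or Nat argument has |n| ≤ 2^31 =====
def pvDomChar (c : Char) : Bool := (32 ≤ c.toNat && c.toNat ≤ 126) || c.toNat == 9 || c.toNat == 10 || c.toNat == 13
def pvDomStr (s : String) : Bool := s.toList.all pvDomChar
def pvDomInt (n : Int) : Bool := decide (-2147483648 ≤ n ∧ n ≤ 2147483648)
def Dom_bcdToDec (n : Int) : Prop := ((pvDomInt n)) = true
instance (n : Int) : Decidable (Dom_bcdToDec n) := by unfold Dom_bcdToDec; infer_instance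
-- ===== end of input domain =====

-- B builds the hex string once (most-significant-first) and maps each hex digit to its
-- decimal string, instead of A's nibble-extraction loop with string prepend; objective: idiomatic.

-- termination helper for both ports' loops
theorem shift4_eq (n : Int) : n >>> (4:Nat) = n / 16 := by
  rw [Int.shiftRight_eq_div_pow]; norm_num

-- ===== PORT A =====
-- while n > 0: m = str(n & 0xF) + m; n >>= 4
def bcdLoopA (n : Int) (m : List Char) : List Char :=
  if 0 < n then
    bcdLoopA (n >>> (4:Nat)) ((PySem.Int.toChars (PySem.Int.band n 15)) ++ m)
  else m
termination_by n.toNat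
decreasing_by
  simp only [shift4_eq]
  omega

def bcdToDec (n : Int) : Int :=
  if n ≤ 0 then 0
  else
    -- int(m): m is a nonempty decimal-digit string here, so ofStr? never fails; getD 0 is unreachable
    (PySem.Int.ofChars? (bcdLoopA n [])).getD 0

-- ===== PORT B =====
-- format(n, 'x') for n > 0, ported by hand (exact: positive int, lowercase hex, no prefix)
def hexChar (d : Int) : Char := "0123456789abcdef".toList.getD d.toNat ' '

def hexStrB (n : Int) (acc : List Char) : List Char :=
  if h : 0 < n then hexStrB (n / 16) (hexChar (n % 16) :: acc) else acc
termination_by n.toNat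
decreasing_by
  have : n / 16 < n := by omega
  have h0 : 0 ≤ n / 16 := by omega
  omega

-- str(int(c, 16)) for a single lowercase hex digit c (exact on the digits format produces)
def decOfHexChar (c : Char) : List Char :=
  PySem.Int.toChars (if 97 ≤ c.toNat then (c.toNat : Int) - 87 else (c.toNat : Int) - 48)

def bcdToDec_alt (n : Int) : Int :=
  if n ≤ 0 then 0
  else
    (PySem.Int.ofChars? ((hexStrB n []).flatMap decOfHexChar)).getD 0

-- ===== PRECONDITION & SPEC =====
def Spec_bcdToDec (n : Int) (out : Int) : Prop := out = bcdToDec_alt n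
instance (n : Int) (out : Int) : Decidable (Spec_bcdToDec n out) := by unfold Spec_bcdToDec; infer_instance

-- ===== CLAIM (what is proved, stated in full; the proofs are below) =====
def Claim_equal_bcdToDec : Prop := ∀ (n : Int), Dom_bcdToDec n → Spec_bcdToDec n (bcdToDec n)

-- ===== LEMMAS AND PROOFS =====

theorem band15_eq (n : Int) (h : 0 ≤ n) : PySem.Int.band n 15 = n % 16 := by
  rw [show (15:Int) = ((15:Nat):Int) by norm_num, PySem.Int.band_of_nonneg h (by norm_num)]
  have : n.toNat &&& 15 = n.toNat % 16 := by
    have := Nat.and_two_pow_sub_one_eq_mod n.toNat 4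
    norm_num at this; omega
  simp only [Int.toNat_natCast]
  omega

theorem dec_hexChar (d : Int) (h0 : 0 ≤ d) (h16 : d < 16) :
    decOfHexChar (hexChar d) = PySem.Int.toChars d := by
  interval_cases d <;> decide

-- accumulator lemma for B's hex loop
theorem hexStrB_acc (n : Int) (acc : List Char) :
    hexStrB n acc = hexStrB n [] ++ acc := by
  induction hk : n.toNat using Nat.strong_induction_on generalizing n acc with
  | _ k ih =>
    by_cases hp : 0 < n
    · rw [hexStrB, dif_pos hp]
      conv_rhs => rw [hexStrB, dif_pos hp]
      rw [ih (n / 16).toNat (by omega) _ _ rfl,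
          ih (n / 16).toNat (by omega) (n / 16) [hexChar (n % 16)] rfl]
      simp
    · rw [hexStrB, dif_neg hp]
      conv_rhs => rw [hexStrB, dif_neg hp]
      simp

-- A's prepend loop builds exactly the per-hex-digit decimal strings, MSB first
theorem loop_eq (n : Int) (m : List Char) (hn : 0 ≤ n) :
    bcdLoopA n m = (hexStrB n []).flatMap decOfHexChar ++ m := by
  induction n, m using bcdLoopA.induct with
  | case1 n m h ih =>
    rw [bcdLoopA, if_pos h]
    rw [shift4_eq] at ih ⊢
    rw [ih (by omega)]
    conv_rhs => rw [hexStrB, dif_pos h, hexStrB_acc (n / 16) [hexChar (n % 16)]]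
    have hmod0 : 0 ≤ n % 16 := by omega
    have hmod16 : n % 16 < 16 := by omega
    simp [band15_eq n (le_of_lt h), dec_hexChar _ hmod0 hmod16]
  | case2 n m h =>
    rw [bcdLoopA, if_neg h]
    rw [hexStrB, dif_neg h]
    simp

-- ===== VERDICT (by name: the statement is the Claim_ definition above) =====
theorem bcdToDec_spec : Claim_equal_bcdToDec := by
  intro n _
  unfold Spec_bcdToDec bcdToDec bcdToDec_alt
  by_cases h : n ≤ 0
  · simp [h]
  · simp only [h, if_false]
    rw [loop_eq n [] (by omega)]
    simp
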